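-- pv_equiv track=rewrite | github.com/WwhdsOne/long | scripts/find_defeated-boss_num.py | get_boss_defeated_counts
-- ===== SOURCE A (Python) =====
-- from collections import defaultdict
--
-- def parse_boss_key(key):
--     prefix = "vote:boss:"
--     if not key.startswith(prefix):
--         return None
--
--     body = key[len(prefix):]
--
--     if ":" not in body:
--         return None
--
--     boss_part, _ = body.split(":", 1)
--
--     if "-" not in boss_part:
--         return None
--
--     boss_id, num_str = boss_part.rsplit("-", 1)
--
--     if not num_str.isdigit():
--         return None
--
--     num = int(num_str)
--
--     # 防止把时间戳、随机ID当成击败数量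
--     if num > 10_000_000:
--         return None
--
--     return boss_id, num
--
-- def get_boss_defeated_counts(keys):
--     result = defaultdict(int)
--
--     for key in keys:
--         parsed = parse_boss_key(key)
--         if not parsed:
--             continue
--
--         boss_id, num = parsed
--         result[boss_id] = max(result[boss_id], num)
--
--     return result
-- ===== SOURCE B (Python) =====
-- from collections import defaultdict
--
-- def get_boss_defeated_counts(keys):
--     # staged pipeline: (1) inline-parse every key into a flat entries list,
--     # (2) group the counts per boss, (3) reduce each group with max.
--     entries = []
--     for key in keys:
--         if key[:10] != "vote:boss:":
--             continue
--         body = key[10:]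
--         i = body.find(":")
--         if i == -1:
--             continue
--         boss_part = body[:i]
--         if "-" not in boss_part:
--             continue
--         j = boss_part.rfind("-")
--         num_str = boss_part[j + 1:]
--         if num_str == "" or not all("0" <= c <= "9" for c in num_str):
--             continue
--         num = int(num_str)
--         if num <= 10_000_000:
--             entries.append((boss_part[:j], num))
--
--     groups = defaultdict(list)
--     for boss_id, num in entries:
--         groups[boss_id].append(num)
--
--     return defaultdict(int, {boss_id: max(nums) for boss_id, nums in groups.items()})
-- ===== Notes on version B (the rewrite author's own statement) =====
-- stated objective: alternative
-- what changed: A's helper-based guard-chain parse (startswith/split/rsplit/isdigit) feeding a single-pass running-max dict is replaced by a three-stage pipeline: one loop inline-parses keys via a slice comparison, find and rfind indices and a per-char digit test into a flat entries list, a second pass groups counts per boss into lists, and a final pass reduces each group with max.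
import Mathlib
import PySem

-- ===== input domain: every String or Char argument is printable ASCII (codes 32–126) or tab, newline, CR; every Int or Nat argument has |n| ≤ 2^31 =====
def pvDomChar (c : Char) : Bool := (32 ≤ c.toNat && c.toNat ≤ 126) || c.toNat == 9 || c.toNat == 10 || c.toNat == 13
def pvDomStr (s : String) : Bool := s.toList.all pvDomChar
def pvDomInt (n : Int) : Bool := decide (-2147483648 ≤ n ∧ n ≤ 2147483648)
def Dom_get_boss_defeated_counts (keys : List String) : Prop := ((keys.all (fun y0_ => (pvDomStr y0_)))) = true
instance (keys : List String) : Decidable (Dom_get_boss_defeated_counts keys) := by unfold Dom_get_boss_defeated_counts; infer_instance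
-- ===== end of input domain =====

-- B replaces A's helper-based guard-chain parse + single-pass running-max dict by a staged
-- pipeline: inline index-based parsing into a flat entries list, then group per boss, then
-- reduce each group with max (same return value; no speed claim).

-- ===== PORT A =====
-- helper parse_boss_key of Source A
def parseBossKey (key : String) : Option (String × Int) :=
  let pre := "vote:boss:".toList
  let kcs := key.toList
  if PySem.Chars.startswith kcs pre = false then none else
  let body := PySem.List.slice kcs (some (pre.length : Int)) none
  if PySem.Chars.isIn [':'] body = false then none else
  -- boss_part, _ = body.split(":", 1): ':' is in body, so the split has exactly 2 pieces; take the first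
  let boss_part := (PySem.Chars.splitOnMax body [':'] 1).headD []
  if PySem.Chars.isIn ['-'] boss_part = false then none else
  -- rsplit("-", 1): '-' is in boss_part (guard above), so it splits at the LAST '-' (rfind); exact here
  let i := (PySem.Chars.rfind boss_part ['-']).toNat
  let boss_id := boss_part.take i
  let num_str := boss_part.drop (i + 1)
  if PySem.Chars.strIsdigit num_str = false then none else
  -- int(num_str): base-10 digit fold; exact since num_str passed str.isdigit (ASCII digits on the stated domain)
  let num : Int := ((num_str.foldl (fun a c => a * 10 + (c.toNat - 48)) 0 : Nat) : Int)
  if num > 10000000 then none else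
  some (String.ofList boss_id, num)

def get_boss_defeated_counts (keys : List String) : List (String × Int) :=
  (keys.foldl
    (fun (d : PySem.Dict String Int) key =>
      match parseBossKey key with
      | none => d
      | some (boss_id, num) => d.insert boss_id (max (d.getD boss_id 0) num))
    PySem.Dict.empty).items

-- ===== PORT B =====
-- stage 1 of Source B: the per-key parse step (body of the first loop), then the loop
def bStep (acc : List (String × Int)) (key : String) : List (String × Int) :=
  let kcs := key.toList
  if PySem.List.slice kcs none (some (10 : Int)) ≠ "vote:boss:".toList then acc else
  let body := PySem.List.slice kcs (some (10 : Int)) none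
  let i := PySem.Chars.find body [':']
  if i = -1 then acc else
  let boss_part := body.take i.toNat
  if PySem.Chars.isIn ['-'] boss_part = false then acc else
  let j := (PySem.Chars.rfind boss_part ['-']).toNat
  let num_str := boss_part.drop (j + 1)
  if num_str = [] ∨ ¬ (num_str.all (fun c => decide ('0' ≤ c) && decide (c ≤ '9'))) = true then acc else
  -- int(num_str): base-10 digit fold; exact since every char is an ASCII digit here
  let num : Int := ((num_str.foldl (fun a c => a * 10 + (c.toNat - 48)) 0 : Nat) : Int)
  if num ≤ 10000000 then acc ++ [(String.ofList (boss_part.take j), num)] else acc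

def bossEntries (keys : List String) : List (String × Int) :=
  keys.foldl bStep []

-- stage 2 of Source B: groups[boss_id].append(num)
def bossGroupsB (entries : List (String × Int)) : PySem.Dict String (List Int) :=
  entries.foldl
    (fun (g : PySem.Dict String (List Int)) p => g.modify p.1 [] (fun ns => ns ++ [p.2]))
    PySem.Dict.empty

def get_boss_defeated_counts_alt (keys : List String) : List (String × Int) :=
  -- stage 3: {boss_id: max(nums) ...}; each group is nonempty, so max never raises
  ((bossGroupsB (bossEntries keys)).items.foldl
    (fun (r : PySem.Dict String Int) p =>
      r.insert p.1 ((PySem.List.max? p.2 (fun y => y)).getD 0))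
    PySem.Dict.empty).items

-- ===== PRECONDITION & SPEC =====
def Spec_get_boss_defeated_counts (keys : List String) (out : List (String × Int)) : Prop := out = get_boss_defeated_counts_alt keys
instance (keys : List String) (out : List (String × Int)) : Decidable (Spec_get_boss_defeated_counts keys out) := by unfold Spec_get_boss_defeated_counts; infer_instance

-- ===== CLAIM (what is proved, stated in full; the proofs are below) =====
def Claim_equal_get_boss_defeated_counts : Prop := ∀ (keys : List String), Dom_get_boss_defeated_counts keys → Spec_get_boss_defeated_counts keys (get_boss_defeated_counts keys)

-- ===== LEMMAS AND PROOFS =====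

-- find.go on a one-char needle: k + position of the first occurrence, or -1
theorem findGo_singleton_mem (c : Char) (s : List Char) (k : Nat) (h : c ∈ s) :
    PySem.Chars.find.go [c] s k = (k : Int) + ((s.takeWhile (fun x => x != c)).length : Int) := by
  induction s generalizing k with
  | nil => cases h
  | cons a t ih =>
      by_cases hac : c = a
      · subst hac
        have hpre : ([c].isPrefixOf (c :: t)) = true := by simp [List.isPrefixOf]
        simp [PySem.Chars.find.go, hpre]
      · have hct : c ∈ t := by
          cases h with
          | head => exact absurd rfl hac
          | tail _ h' => exact h'
        have hpre : ([c].isPrefixOf (a :: t)) = false := by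
          simp [List.isPrefixOf]; exact hac
        have hane : (a != c) = true := bne_iff_ne.mpr (fun hh => hac hh.symm)
        simp only [PySem.Chars.find.go, hpre, Bool.false_eq_true, if_false,
          List.takeWhile_cons, hane, if_true]
        rw [ih (k + 1) hct]
        simp only [List.length_cons]
        push_cast
        ring

theorem findGo_singleton_not_mem (c : Char) (s : List Char) (k : Nat) (h : c ∉ s) :
    PySem.Chars.find.go [c] s k = -1 := by
  induction s generalizing k with
  | nil => simp [PySem.Chars.find.go, List.isEmpty]
  | cons a t ih =>
      have hac : ¬ (c = a) := fun hh => h (hh ▸ List.mem_cons_self ..)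
      have hct : c ∉ t := fun hh => h (List.mem_cons_of_mem _ hh)
      have hpre : ([c].isPrefixOf (a :: t)) = false := by
        simp [List.isPrefixOf]; exact hac
      simp only [PySem.Chars.find.go, hpre, Bool.false_eq_true, if_false]
      exact ih (k + 1) hct

theorem find_singleton_mem (c : Char) (s : List Char) (h : c ∈ s) :
    PySem.Chars.find s [c] = ((s.takeWhile (fun x => x != c)).length : Int) := by
  unfold PySem.Chars.find
  rw [findGo_singleton_mem c s 0 h]; simp

theorem isIn_singleton_iff (c : Char) (s : List Char) :
    PySem.Chars.isIn [c] s = true ↔ c ∈ s := by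
  unfold PySem.Chars.isIn PySem.Chars.find
  constructor
  · intro hin
    by_contra hmem
    rw [findGo_singleton_not_mem c s 0 hmem] at hin
    simp at hin
  · intro hmem
    rw [findGo_singleton_mem c s 0 hmem]
    simp

-- splitOnMax.go with budget 0 just emits the remainder
theorem splitGo_zero (sep : List Char) (fuel : Nat) (l : List Char) (acc : List (List Char)) :
    PySem.Chars.splitOnMax.go sep fuel 0 l [] acc = (l :: acc).reverse := by
  cases fuel <;> cases l <;> simp [PySem.Chars.splitOnMax.go]

-- splitOnMax.go with budget 1 on a one-char sep that occurs: head piece + remainder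
theorem splitGo_one (c : Char) (fuel : Nat) (s cur : List Char) (acc : List (List Char))
    (hf : s.length ≤ fuel) (h : c ∈ s) :
    PySem.Chars.splitOnMax.go [c] fuel 1 s cur acc
      = acc.reverse ++ [cur.reverse ++ s.takeWhile (fun x => x != c),
                        (s.dropWhile (fun x => x != c)).drop 1] := by
  induction fuel generalizing s cur acc with
  | zero =>
      have : s = [] := List.eq_nil_of_length_eq_zero (Nat.le_zero.mp hf)
      subst this; cases h
  | succ n ih =>
      cases s with
      | nil => cases h
      | cons a t =>
          by_cases hac : c = a
          · subst hac
            have hpre : ([c].isPrefixOf (c :: t)) = true := by simp [List.isPrefixOf]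
            have hcc : (c != c) = false := by simp
            simp only [PySem.Chars.splitOnMax.go, hpre, if_true, List.takeWhile_cons,
              List.dropWhile_cons, hcc, List.length_cons, List.drop_succ_cons]
            rw [splitGo_zero]
            simp
          · have hct : c ∈ t := by
              cases h with
              | head => exact absurd rfl hac
              | tail _ h' => exact h'
            have hf' : t.length ≤ n := by simpa using hf
            have hpre : ([c].isPrefixOf (a :: t)) = false := by
              simp [List.isPrefixOf]; exact hac
            have hane : (a != c) = true := bne_iff_ne.mpr (fun hh => hac hh.symm)
            simp only [PySem.Chars.splitOnMax.go, hpre, Bool.false_eq_true, if_false,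
              List.takeWhile_cons, List.dropWhile_cons, hane, if_true]
            rw [ih t (a :: cur) acc hf' hct]
            simp

theorem splitOnMax_one_headD (c : Char) (s : List Char) (h : c ∈ s) :
    (PySem.Chars.splitOnMax s [c] 1).headD [] = s.takeWhile (fun x => x != c) := by
  unfold PySem.Chars.splitOnMax
  rw [if_neg (by norm_num), show ((1 : Int)).toNat = 1 from rfl]
  rw [splitGo_one c (s.length + 1) s [] [] (by omega) h]
  simp

-- the per-key step of B's first stage appends exactly parse_boss_key's result
set_option maxHeartbeats 1600000 in
theorem stepB_eq (acc : List (String × Int)) (key : String) :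
    bStep acc key = acc ++ (parseBossKey key).elim [] (fun p => [p]) := by
  have hlen10 : ("vote:boss:".toList.length) = 10 := by decide
  have hsl10 : PySem.List.slice key.toList none (some (10 : Int)) = key.toList.take 10 := by
    rw [PySem.List.slice_to key.toList (by norm_num : (0:Int) ≤ (10:Int))]
    rfl
  have hbodyB : PySem.List.slice key.toList (some (10 : Int)) none = key.toList.drop 10 := by
    rw [PySem.List.slice_from key.toList (by norm_num : (0:Int) ≤ (10:Int))]
    rfl
  have hbodyA : PySem.List.slice key.toList (some (("vote:boss:".toList.length : Nat) : Int)) none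
      = key.toList.drop 10 := by
    rw [PySem.List.slice_from key.toList (by exact_mod_cast Nat.zero_le _), Int.toNat_natCast,
      hlen10]
  simp only [bStep, parseBossKey]
  rw [hsl10, hbodyA, hbodyB]
  by_cases hsw : PySem.Chars.startswith key.toList "vote:boss:".toList = true
  · -- the prefix matches
    have htake : key.toList.take 10 = "vote:boss:".toList :=
      (List.prefix_iff_eq_take.mp ((PySem.Chars.startswith_iff _ _).mp hsw)).symm
    rw [if_neg (show ¬ (key.toList.take 10 ≠ "vote:boss:".toList) from by
      rw [htake]; exact fun h => h rfl)]
    rw [if_neg (show ¬ (PySem.Chars.startswith key.toList "vote:boss:".toList = false) from by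
      rw [hsw]; exact fun h => nomatch h)]
    by_cases hcol : ':' ∈ key.toList.drop 10
    · -- ':' occurs in the body
      have hIn : PySem.Chars.isIn [':'] (key.toList.drop 10) = true :=
        (isIn_singleton_iff _ _).mpr hcol
      have hfind : PySem.Chars.find (key.toList.drop 10) [':']
          = (((key.toList.drop 10).takeWhile (fun x => x != ':')).length : Int) :=
        find_singleton_mem ':' _ hcol
      have hfind_ne : ¬ (PySem.Chars.find (key.toList.drop 10) [':'] = -1) := by
        rw [hfind]; omega
      have hbp : (key.toList.drop 10).take (PySem.Chars.find (key.toList.drop 10) [':']).toNat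
          = (PySem.Chars.splitOnMax (key.toList.drop 10) [':'] 1).headD [] := by
        rw [splitOnMax_one_headD ':' _ hcol, hfind, Int.toNat_natCast,
          ← List.prefix_iff_eq_take.mp (List.takeWhile_prefix _)]
      rw [if_neg hfind_ne]
      rw [if_neg (show ¬ (PySem.Chars.isIn [':'] (key.toList.drop 10) = false) from by
        rw [hIn]; exact fun h => nomatch h)]
      rw [hbp]
      set bp := (PySem.Chars.splitOnMax (key.toList.drop 10) [':'] 1).headD [] with hbpdef
      by_cases hdash : PySem.Chars.isIn ['-'] bp = false
      · rw [if_pos hdash]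
        rw [if_pos hdash]
        simp
      · rw [if_neg hdash]
        rw [if_neg hdash]
        set ns := bp.drop ((PySem.Chars.rfind bp ['-']).toNat + 1) with hnsdef
        have hiff : (ns = [] ∨ ¬ (ns.all (fun c => decide ('0' ≤ c) && decide (c ≤ '9'))) = true)
            ↔ ¬ (PySem.Chars.strIsdigit ns = true) := by
          by_cases hns : ns = [] <;>
            simp [PySem.Chars.strIsdigit, PySem.Chars.isdigit, hns]
        by_cases hcb : (ns = [] ∨ ¬ (ns.all (fun c => decide ('0' ≤ c) && decide (c ≤ '9'))) = true)
        · have hA : PySem.Chars.strIsdigit ns = false := by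
            have := hiff.mp hcb
            revert this; cases PySem.Chars.strIsdigit ns <;> simp
          rw [if_pos hcb]
          rw [if_pos hA]
          simp
        · have hA : PySem.Chars.strIsdigit ns = true := by
            by_contra hh
            exact hcb (hiff.mpr hh)
          rw [if_neg hcb]
          rw [if_neg (show ¬ (PySem.Chars.strIsdigit ns = false) from by
            rw [hA]; exact fun h => nomatch h)]
          set num : Int := ((ns.foldl (fun a c => a * 10 + (c.toNat - 48)) 0 : Nat) : Int) with hnum
          by_cases hle : num ≤ 10000000
          · rw [if_pos hle]
            rw [if_neg (show ¬ (num > 10000000) from by omega)]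
            simp
          · rw [if_neg hle]
            rw [if_pos (show num > 10000000 from by omega)]
            simp
    · -- no ':' in the body: both sides skip the key
      have hInF : PySem.Chars.isIn [':'] (key.toList.drop 10) = false := by
        unfold PySem.Chars.isIn PySem.Chars.find
        rw [findGo_singleton_not_mem ':' _ 0 hcol]
        simp
      have hfindeq : PySem.Chars.find (key.toList.drop 10) [':'] = -1 := by
        unfold PySem.Chars.find
        exact findGo_singleton_not_mem ':' _ 0 hcol
      rw [if_pos hfindeq]
      rw [if_pos hInF]
      simp
  · -- the prefix does not match: both sides skip the key
    have hswf : PySem.Chars.startswith key.toList "vote:boss:".toList = false := by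
      revert hsw; cases PySem.Chars.startswith key.toList "vote:boss:".toList <;> simp
    have hne : key.toList.take 10 ≠ "vote:boss:".toList := by
      intro hEq
      exact hsw ((PySem.Chars.startswith_iff _ _).mpr
        (List.prefix_iff_eq_take.mpr (by rw [show ("vote:boss:".toList).length = 10 from rfl, hEq])))
    rw [if_pos hne]
    rw [if_pos hswf]
    simp

-- stage 1 of B collects exactly the successfully parsed pairs, in order
theorem bossEntries_eq (keys : List String) :
    bossEntries keys = keys.filterMap parseBossKey := by
  unfold bossEntries
  suffices h : ∀ (ks : List String) (init : List (String × Int)),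
      ks.foldl bStep init = init ++ ks.filterMap parseBossKey by
    simpa using h keys []
  intro ks
  induction ks with
  | nil => intro init; simp
  | cons k t ih =>
      intro init
      rw [List.foldl_cons, List.filterMap_cons, stepB_eq init k, ih]
      cases hp : parseBossKey k <;> simp

-- A's parse-then-dispatch loop is the plain fold over the successfully parsed pairs
theorem foldA_filterMap (keys : List String) (init : PySem.Dict String Int) :
    keys.foldl
      (fun d key =>
        match parseBossKey key with
        | none => d
        | some (boss_id, num) => d.insert boss_id (max (d.getD boss_id 0) num))
      init
    = (keys.filterMap parseBossKey).foldl
        (fun d p => d.insert p.1 (max (d.getD p.1 0) p.2)) init := by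
  induction keys generalizing init with
  | nil => rfl
  | cons k ks ih =>
      simp only [List.foldl_cons, List.filterMap_cons]
      cases h : parseBossKey k with
      | none => exact ih init
      | some p => cases p; simp only [List.foldl_cons]; apply ih

-- every parsed count is nonnegative (it is the value of a digit fold)
theorem parse_nonneg (key : String) (b : String) (n : Int)
    (h : parseBossKey key = some (b, n)) : 0 ≤ n := by
  unfold parseBossKey at h
  simp only at h
  split at h
  · exact absurd h (by simp)
  · split at h
    · exact absurd h (by simp)
    · split at h
      · exact absurd h (by simp)
      · split at h
        · exact absurd h (by simp)
        · split at h
          · exact absurd h (by simp)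
          · injection h with h'
            rw [← ((Prod.mk.injEq ..).mp h').2]
            positivity

-- lookup through the running-max loop: the fold of max over the values filed under c
theorem getD_foldl_insert_max (l : List (String × Int)) (d : PySem.Dict String Int) (c : String) :
    (l.foldl (fun d p => d.insert p.1 (max (d.getD p.1 0) p.2)) d).getD c 0
      = ((l.filter (fun p => p.1 == c)).map (fun p => p.2)).foldl max (d.getD c 0) := by
  induction l generalizing d with
  | nil => rfl
  | cons p t ih =>
      simp only [List.foldl_cons, List.filter_cons]
      by_cases hc : p.1 = c
      · rw [ih, PySem.Dict.getD_insert, if_pos hc.symm]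
        simp [hc]
      · rw [ih, PySem.Dict.getD_insert, if_neg (fun h => hc h.symm)]
        simp [beq_eq_false_iff_ne.mpr hc]

-- ===== VERDICT (by name: the statement is the Claim_ definition above) =====
theorem get_boss_defeated_counts_spec : Claim_equal_get_boss_defeated_counts := by
  intro keys _
  unfold Spec_get_boss_defeated_counts get_boss_defeated_counts get_boss_defeated_counts_alt bossGroupsB
  rw [foldA_filterMap, bossEntries_eq]
  set ps := keys.filterMap parseBossKey with hps
  have hnonneg : ∀ p ∈ ps, 0 ≤ p.2 := by
    intro p hp
    obtain ⟨k, -, hk⟩ := List.mem_filterMap.mp hp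
    exact parse_nonneg k p.1 p.2 (by rwa [← Prod.mk.eta (p := p)] at hk)
  set dA := ps.foldl (fun d p => d.insert p.1 (max (d.getD p.1 0) p.2))
      (PySem.Dict.empty : PySem.Dict String Int) with hdA
  set g := ps.foldl (fun g p => g.modify p.1 [] (fun ns => ns ++ [p.2]))
      (PySem.Dict.empty : PySem.Dict String (List Int)) with hg
  have hAkeys : dA.keys = PySem.Set.ofList (ps.map (fun p => p.1)) := by
    rw [hdA, PySem.Dict.keys_foldl_insert_key ps (fun p => p.1)
      (fun d p => max (d.getD p.1 0) p.2), PySem.Dict.keys_empty, PySem.Set.update_nil_left]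
  have hGkeys : g.keys = PySem.Set.ofList (ps.map (fun p => p.1)) := by
    rw [hg, PySem.Dict.keys_foldl_modify_key ps (fun p => p.1) []
      (fun _ p ns => ns ++ [p.2]), PySem.Dict.keys_empty, PySem.Set.update_nil_left]
  have hAnodup : dA.keys.Nodup := hAkeys ▸ PySem.Set.nodup_ofList _
  have hGnodup : g.keys.Nodup := hGkeys ▸ PySem.Set.nodup_ofList _
  -- the third stage of B appends one reduced item per group
  have hfresh := PySem.Dict.items_foldl_insert_fresh g.items (fun p => p.1)
      (fun p => (PySem.List.max? p.2 (fun y => y)).getD 0)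
      (PySem.Dict.empty : PySem.Dict String Int)
      (fun a _ => PySem.Dict.contains_empty _) (by exact hGnodup)
  rw [hfresh]
  rw [show (PySem.Dict.empty : PySem.Dict String Int).items = [] from rfl, List.nil_append]
  rw [PySem.Dict.items_eq_map_keys dA hAnodup 0,
      PySem.Dict.items_eq_map_keys g hGnodup [], hAkeys, hGkeys, List.map_map]
  refine List.map_congr_left ?_
  intro c hc
  obtain ⟨p, hpmem, hpc⟩ :=
    List.mem_map.mp ((PySem.Set.mem_ofList (xs := ps.map (fun p => p.1)) (y := c)).mp hc)
  have hvs : g.getD c [] = (ps.filter (fun p => p.1 == c)).map (fun p => p.2) := by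
    rw [hg, PySem.Dict.getD_foldl_modify_append, PySem.Dict.getD_empty, List.nil_append]
  have hda : dA.getD c 0 = ((ps.filter (fun p => p.1 == c)).map (fun p => p.2)).foldl max 0 := by
    rw [hdA, getD_foldl_insert_max, PySem.Dict.getD_empty]
  set vs := (ps.filter (fun p => p.1 == c)).map (fun p => p.2) with hvsdef
  have hvne : vs ≠ [] := by
    have hmem : p ∈ ps.filter (fun p => p.1 == c) :=
      List.mem_filter.mpr ⟨hpmem, beq_iff_eq.mpr hpc⟩
    have hmem2 : p.2 ∈ vs := by
      rw [hvsdef]; exact List.mem_map_of_mem hmem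
    intro hnil
    rw [hnil] at hmem2
    exact List.not_mem_nil hmem2
  have hvnn : ∀ x ∈ vs, (0:Int) ≤ x := by
    intro x hx
    obtain ⟨q, hq, rfl⟩ := List.mem_map.mp hx
    exact hnonneg q (List.mem_filter.mp hq).1
  simp only [Function.comp_apply]
  cases hv : vs with
  | nil => exact absurd hv hvne
  | cons x t =>
      have hx : (0:Int) ≤ x := hvnn x (hv ▸ List.mem_cons_self ..)
      congr 1
      rw [hda, hvs, hv, PySem.List.max?_id_cons, Option.getD_some, List.foldl_cons,
        max_eq_right hx]
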